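-- pv_equiv track=rewrite | github.com/smyha/siem-lite | siem_lite/utils/security.py | sanitize_command_input
-- ===== SOURCE A (Python) =====
-- def sanitize_command_input(input_str: str) -> str:
--     """Sanitize input to prevent command injection."""
--     # Remove command injection metacharacters
--     dangerous_chars = [
--         "&",
--         "|",
--         ";",
--         "$",
--         "`",
--         ">",
--         "<",
--         "(",
--         ")",
--         "{",
--         "}",
--         "[",
--         "]",
--     ]
--     for char in dangerous_chars:
--         input_str = input_str.replace(char, "")
--     return input_str.strip()
-- ===== SOURCE B (Python) =====
-- _DANGEROUS = frozenset("&|;$`><(){}[]")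
--
--
-- def sanitize_command_input(input_str: str) -> str:
--     """Sanitize input to prevent command injection."""
--     return ''.join(c for c in input_str if c not in _DANGEROUS).strip()
-- ===== Notes on version B (the rewrite author's own statement) =====
-- stated objective: idiomatic
-- what changed: B makes a single pass over the input, keeping each character not in a frozenset of the 13 dangerous characters, instead of A's 13 full re-scans of the string via repeated str.replace.
import Mathlib
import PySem

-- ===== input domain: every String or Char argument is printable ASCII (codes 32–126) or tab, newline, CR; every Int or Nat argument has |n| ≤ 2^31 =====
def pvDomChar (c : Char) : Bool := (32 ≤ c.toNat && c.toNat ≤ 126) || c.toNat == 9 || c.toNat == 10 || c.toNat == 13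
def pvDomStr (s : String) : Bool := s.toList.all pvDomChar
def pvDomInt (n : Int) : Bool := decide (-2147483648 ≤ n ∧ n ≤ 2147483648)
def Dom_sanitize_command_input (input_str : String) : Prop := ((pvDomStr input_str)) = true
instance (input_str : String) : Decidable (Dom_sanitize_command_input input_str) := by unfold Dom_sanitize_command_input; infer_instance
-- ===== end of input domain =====

-- B replaces A's 13 repeated str.replace re-scans with one pass over the input filtering
-- against a frozenset of the dangerous characters (idiomatic; same result).

-- ===== PORT A =====
-- the literal dangerous_chars list of A
def pvDangerousChars : List String := ["&","|",";","$","`",">","<","(",")","{","}","[","]"]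

def sanitize_command_input (input_str : String) : String :=
  PySem.Str.strip (pvDangerousChars.foldl (fun acc ch => PySem.Str.replace acc ch "") input_str)

-- ===== PORT B =====
-- B's frozenset of dangerous characters
def pvDangerousSet : List Char := PySem.Set.ofList "&|;$`><(){}[]".toList

def sanitize_command_input_alt (input_str : String) : String :=
  PySem.Str.strip (String.ofList (input_str.toList.filter (fun c => !(pvDangerousSet.contains c))))

-- ===== PRECONDITION & SPEC =====
def Spec_sanitize_command_input (input_str : String) (out : String) : Prop := out = sanitize_command_input_alt input_str
instance (input_str : String) (out : String) : Decidable (Spec_sanitize_command_input input_str out) := by unfold Spec_sanitize_command_input; infer_instance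

-- ===== CLAIM (what is proved, stated in full; the proofs are below) =====
def Claim_equal_sanitize_command_input : Prop := ∀ (input_str : String), Dom_sanitize_command_input input_str → Spec_sanitize_command_input input_str (sanitize_command_input input_str)

-- ===== LEMMAS AND PROOFS =====

-- replace.go with a single-character pattern and empty replacement is a filter
lemma pvGoSingle (c : Char) : ∀ (fuel : Nat) (l acc : List Char), l.length ≤ fuel →
    PySem.Chars.replace.go [c] [] fuel l acc = acc.reverse ++ l.filter (fun x => x != c) := by
  intro fuel
  induction fuel with
  | zero => intro l acc h; cases l with
    | nil => simp [PySem.Chars.replace.go]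
    | cons a t => simp at h
  | succ n ih =>
    intro l acc h
    cases l with
    | nil => simp [PySem.Chars.replace.go]
    | cons a t =>
      simp only [PySem.Chars.replace.go]
      by_cases hc : a = c
      · subst hc
        simp [List.isPrefixOf, ih t _ (by simpa using h)]
      · have : List.isPrefixOf [c] (a :: t) = false := by
          simp [List.isPrefixOf]; exact fun h' => (hc h'.symm).elim
        simp [this, ih t _ (by simpa using h), hc, bne]

lemma pvReplaceSingle (c : Char) (l : List Char) :
    PySem.Chars.replace l [c] [] = l.filter (fun x => x != c) := by
  simp [PySem.Chars.replace, pvGoSingle c l.length l [] le_rfl]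

lemma pvStrReplaceOne (cstr : String) (c : Char) (h : cstr.toList = [c]) (t : String) :
    (PySem.Str.replace t cstr "").toList = t.toList.filter (fun x => x != c) := by
  simp [PySem.Str.replace, h, pvReplaceSingle]

-- ===== VERDICT (by name: the statement is the Claim_ definition above) =====
theorem sanitize_command_input_spec : Claim_equal_sanitize_command_input := by
  intro s _
  unfold Spec_sanitize_command_input sanitize_command_input sanitize_command_input_alt
  have key : (pvDangerousChars.foldl (fun acc ch => PySem.Str.replace acc ch "") s).toList
      = s.toList.filter (fun c => !(pvDangerousSet.contains c)) := by
    simp only [pvDangerousChars, List.foldl]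
    rw [pvStrReplaceOne "]" ']' (by decide), pvStrReplaceOne "[" '[' (by decide),
        pvStrReplaceOne "}" '}' (by decide), pvStrReplaceOne "{" '{' (by decide),
        pvStrReplaceOne ")" ')' (by decide), pvStrReplaceOne "(" '(' (by decide),
        pvStrReplaceOne "<" '<' (by decide), pvStrReplaceOne ">" '>' (by decide),
        pvStrReplaceOne "`" '`' (by decide), pvStrReplaceOne "$" '$' (by decide),
        pvStrReplaceOne ";" ';' (by decide), pvStrReplaceOne "|" '|' (by decide),
        pvStrReplaceOne "&" '&' (by decide)]
    simp only [List.filter_filter]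
    apply List.filter_congr
    intro x _
    have hd : pvDangerousSet = ['&','|',';','$','`','>','<','(',')','{','}','[',']'] := by decide
    simp only [hd, List.contains_cons, List.contains_nil, Bool.or_false, Bool.not_or, bne]
    ac_rfl
  rw [← key, String.ofList_toList]
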